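-- pv_equiv track=rewrite | github.com/Lay-RosaLauren/Coursera-Python-2 | Week02/primeiro_lex.py | primeiro_lex
-- ===== SOURCE A (Python) =====
-- def primeiro_lex(lista):
--     # se não receber uma lista valida, retorne False
--     if not len(lista) or type(lista) != list:
--         return False
--
--     # define a variável com o valor do primeiro elemento da lista recebida
--     primeiro_string = lista[0]
--
--     for s in lista:
--         # realiza a comparação de ordem lexicográfica
--         if s < primeiro_string:
--             primeiro_string = s
--
--     return primeiro_string
-- ===== SOURCE B (Python) =====
-- def primeiro_lex(lista):
--     # se não receber uma lista valida, retorne False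
--     if not len(lista) or type(lista) != list:
--         return False
--     # sort and take the first (smallest) element
--     return sorted(lista)[0]
-- ===== Notes on version B (the rewrite author's own statement) =====
-- stated objective: simpler
-- what changed: Replaces the running-minimum scan with sorting the list and returning its first element.
import Mathlib
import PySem

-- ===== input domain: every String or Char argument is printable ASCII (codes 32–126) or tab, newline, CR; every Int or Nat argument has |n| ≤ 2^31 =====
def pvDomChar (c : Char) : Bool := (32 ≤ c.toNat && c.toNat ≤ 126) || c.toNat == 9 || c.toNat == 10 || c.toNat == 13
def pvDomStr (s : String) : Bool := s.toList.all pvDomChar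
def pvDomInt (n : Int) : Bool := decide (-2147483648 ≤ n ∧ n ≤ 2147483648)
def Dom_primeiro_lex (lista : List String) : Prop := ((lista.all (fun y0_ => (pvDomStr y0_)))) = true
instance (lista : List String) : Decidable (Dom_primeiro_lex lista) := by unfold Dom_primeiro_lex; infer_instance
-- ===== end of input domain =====

-- B replaces A's running-minimum loop by sorting the list and taking its head (objective: simpler).

-- ===== PORT A =====
-- running-minimum loop: primeiro_string = lista[0]; for s in lista: if s < primeiro_string: primeiro_string = s
def primeiro_lex (lista : List String) : String :=
  match lista with
  | [] => ""          -- Python returns False here (not a String); excluded by Pre_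
  | h :: _ => lista.foldl (fun primeiro_string s => if s < primeiro_string then s else primeiro_string) h

-- ===== PORT B =====
-- sorted(lista)[0]
def primeiro_lex_alt (lista : List String) : String :=
  match PySem.List.sorted lista (fun x => x) false with
  | [] => ""          -- empty input: Python B returns False; excluded by Pre_
  | m :: _ => m

-- ===== PRECONDITION & SPEC =====
-- Pre_ excludes the empty list, where both Pythons return False, which is not a value of the String return type.
def Pre_primeiro_lex (lista : List String) : Prop := lista ≠ []
instance (lista : List String) : Decidable (Pre_primeiro_lex lista) := by unfold Pre_primeiro_lex; infer_instance
def pvWitness_primeiro_lex : List String := (["b", "a", "c"])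

def Spec_primeiro_lex (lista : List String) (out : String) : Prop := out = primeiro_lex_alt lista
instance (lista : List String) (out : String) : Decidable (Spec_primeiro_lex lista out) := by unfold Spec_primeiro_lex; infer_instance

-- ===== CLAIM (what is proved, stated in full; the proofs are below) =====
def Claim_equal_primeiro_lex : Prop := ∀ (lista : List String), Dom_primeiro_lex lista → Pre_primeiro_lex lista → Spec_primeiro_lex lista (primeiro_lex lista)

-- ===== LEMMAS AND PROOFS =====

-- A's loop body is the binary min on strings
lemma step_eq_min : (fun (a s : String) => if s < a then s else a) = (fun a s => min a s) := by
  funext a s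
  by_cases h : s < a
  · simp [min_def, h, not_le.mpr h]
  · simp [h, le_of_not_gt h]

lemma primeiro_lex_cons (h : String) (t : List String) :
    primeiro_lex (h :: t) = t.foldl min h := by
  show (h :: t).foldl (fun primeiro_string s => if s < primeiro_string then s else primeiro_string) h
      = t.foldl min h
  rw [step_eq_min]
  simp

-- ===== VERDICT (by name: the statement is the Claim_ definition above) =====
theorem primeiro_lex_spec : Claim_equal_primeiro_lex := by
  intro lista _ hpre
  unfold Spec_primeiro_lex
  cases lista with
  | nil => exact absurd rfl hpre
  | cons h t =>
    rw [primeiro_lex_cons]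
    have hmin : PySem.List.min? (h :: t) (fun y => y) = some (t.foldl min h) :=
      PySem.List.min?_id_cons h t
    have hfmem : t.foldl min h ∈ h :: t := PySem.List.min?_mem hmin
    have hfmin : ∀ y ∈ h :: t, t.foldl min h ≤ y := by
      intro y hy
      exact PySem.List.min?_isMin hmin y hy
    unfold primeiro_lex_alt
    cases hs : PySem.List.sorted (h :: t) (fun x => x) false with
    | nil => exact absurd hs (by simp [PySem.List.sorted_eq_nil_iff])
    | cons m rest =>
      have hmle : ∀ y ∈ h :: t, m ≤ y := fun y hy => PySem.List.key_head_sorted_le _ _ hs y hy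
      have hmmem : m ∈ h :: t := by
        have : m ∈ PySem.List.sorted (h :: t) (fun x => x) false := by simp [hs]
        exact (PySem.List.mem_sorted _ _ _ _).mp this
      exact le_antisymm (hfmin m hmmem) (hmle _ hfmem)
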